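-- pv_equiv track=rewrite | github.com/Competitive-Programming-UNSAAC/cuscontest-repository | 2024/A_DecodificacionMaya/solution.py | solve
-- ===== SOURCE A (Python) =====
-- from enum import Enum
--
-- class Mayan1Decimal(str, Enum):
--     zero = '<=>'
--     one = '*'
--     five = '---'
--
-- def decode(mayan_number: list[list[str]]) -> int:
--     # Helper function to decode a single level
--     def decode_level(level: list[str]) -> int:
--         value = 0
--         for symbol in level:
--             if symbol == Mayan1Decimal.zero:
--                 continue
--             elif symbol == Mayan1Decimal.five:
--                 value += 5
--             else:
--                 # symbol is one
--                 value += len(symbol)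
--         return value
--
--     # Decode each level from the bottom up
--     total_value = 0
--     for position, level in enumerate(reversed(mayan_number)):
--         level_value = decode_level(level)
--         total_value += level_value * (20 ** position)
--
--     return total_value
--
-- def solve(tty_in):
--     digit = []
--     mayan_number = []
--     for line in tty_in:
--         if len(line.strip()) == 0:
--             mayan_number.append(digit)
--             digit = []
--         else:
--             digit.append(line.strip())
--     mayan_number.append(digit)
--     decimal = decode(mayan_number)
--
--     return decimal
-- ===== SOURCE B (Python) =====
-- def solve(tty_in):
--     # One pass, Horner accumulator: each completed level multiplies the total by 20.
--     total = 0
--     cur = 0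
--     for line in tty_in:
--         s = line.strip()
--         if not s:
--             total = total * 20 + cur
--             cur = 0
--         elif s == '---':
--             cur += 5
--         elif s != '<=>':
--             cur += len(s)
--     return total * 20 + cur
-- ===== Notes on version B (the rewrite author's own statement) =====
-- stated objective: simpler
-- what changed: Replaces A's two-phase build-list-of-levels-then-reversed/enumerate weighted power sum with a single forward pass holding a Horner accumulator (total = total*20 + level value) and no intermediate lists.
import Mathlib
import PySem

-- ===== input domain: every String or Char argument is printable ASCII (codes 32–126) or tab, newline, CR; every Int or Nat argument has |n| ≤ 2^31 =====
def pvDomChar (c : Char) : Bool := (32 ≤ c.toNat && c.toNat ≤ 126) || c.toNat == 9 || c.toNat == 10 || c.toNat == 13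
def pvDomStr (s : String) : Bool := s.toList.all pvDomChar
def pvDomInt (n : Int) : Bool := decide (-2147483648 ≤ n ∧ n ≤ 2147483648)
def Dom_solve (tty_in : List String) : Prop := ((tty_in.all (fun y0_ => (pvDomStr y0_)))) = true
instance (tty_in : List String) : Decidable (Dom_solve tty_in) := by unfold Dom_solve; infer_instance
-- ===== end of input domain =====

-- B replaces A's build-levels-then-reversed/enumerate power sum by one forward pass with a Horner accumulator (simpler; same cost).

-- ===== PORT A =====
def decodeLevel (level : List String) : Int :=
  level.foldl (fun value symbol =>
    if symbol = "<=>" then value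
    else if symbol = "---" then value + 5
    else value + PySem.Str.len symbol) 0

def decode (mayan_number : List (List String)) : Int :=
  (PySem.List.enumerate mayan_number.reverse).foldl
    (fun total_value pl => total_value + decodeLevel pl.2 * (20 ^ pl.1.toNat)) 0

def solve (tty_in : List String) : Int :=
  let st := tty_in.foldl
    (fun (st : List String × List (List String)) line =>
      if PySem.Str.len (PySem.Str.strip line) = 0 then ([], st.2 ++ [st.1])
      else (st.1 ++ [PySem.Str.strip line], st.2))
    ([], [])
  decode (st.2 ++ [st.1])

-- ===== PORT B =====
def solve_alt (tty_in : List String) : Int :=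
  let tc := tty_in.foldl
    (fun (tc : Int × Int) line =>
      let s := PySem.Str.strip line
      if PySem.Str.len s = 0 then (tc.1 * 20 + tc.2, 0)
      else if s = "---" then (tc.1, tc.2 + 5)
      else if s = "<=>" then tc
      else (tc.1, tc.2 + PySem.Str.len s))
    (0, 0)
  tc.1 * 20 + tc.2

-- ===== PRECONDITION & SPEC =====
def Spec_solve (tty_in : List String) (out : Int) : Prop := out = solve_alt tty_in
instance (tty_in : List String) (out : Int) : Decidable (Spec_solve tty_in out) := by unfold Spec_solve; infer_instance

-- ===== CLAIM (what is proved, stated in full; the proofs are below) =====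
def Claim_equal_solve : Prop := ∀ (tty_in : List String), Dom_solve tty_in → Spec_solve tty_in (solve tty_in)

-- ===== LEMMAS AND PROOFS =====

-- proof-only names for the two loop bodies (definitionally the lambdas inside the ports)
def astep (st : List String × List (List String)) (line : String) :
    List String × List (List String) :=
  if PySem.Str.len (PySem.Str.strip line) = 0 then ([], st.2 ++ [st.1])
  else (st.1 ++ [PySem.Str.strip line], st.2)

def bstep (tc : Int × Int) (line : String) : Int × Int :=
  let s := PySem.Str.strip line
  if PySem.Str.len s = 0 then (tc.1 * 20 + tc.2, 0)
  else if s = "---" then (tc.1, tc.2 + 5)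
  else if s = "<=>" then tc
  else (tc.1, tc.2 + PySem.Str.len s)

-- Horner form of decode, used only by the proof.
def hdec (xs : List (List String)) : Int :=
  xs.foldl (fun t l => t * 20 + decodeLevel l) 0

theorem hdec_append_singleton (xs : List (List String)) (d : List String) :
    hdec (xs ++ [d]) = hdec xs * 20 + decodeLevel d := by
  simp [hdec, List.foldl_append]

theorem decodeLevel_append_singleton (d : List String) (s : String) :
    decodeLevel (d ++ [s]) =
      if s = "<=>" then decodeLevel d
      else if s = "---" then decodeLevel d + 5
      else decodeLevel d + PySem.Str.len s := by
  simp [decodeLevel, List.foldl_append]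

theorem bstep_blank (line : String) (m : List (List String)) (d : List String)
    (h : PySem.Str.len (PySem.Str.strip line) = 0) :
    bstep (hdec m, decodeLevel d) line = (hdec (m ++ [d]), decodeLevel []) := by
  have h' : PySem.Chars.strip line.toList = [] := by simp [pysem] at h; exact h
  simp [bstep, h', hdec_append_singleton, decodeLevel]

theorem bstep_sym (line : String) (m : List (List String)) (d : List String)
    (h : ¬ PySem.Str.len (PySem.Str.strip line) = 0) :
    bstep (hdec m, decodeLevel d) line =
      (hdec m, decodeLevel (d ++ [PySem.Str.strip line])) := by
  have h' : ¬ PySem.Chars.strip line.toList = [] := by simp [pysem] at h ⊢; exact h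
  unfold bstep
  rw [decodeLevel_append_singleton]
  by_cases h5 : PySem.Str.strip line = "---"
  · simp [h5]
  · by_cases h0 : PySem.Str.strip line = "<=>"
    · simp [h0]
    · simp [h', h5, h0]

theorem astep_blank (line : String) (m : List (List String)) (d : List String)
    (h : PySem.Str.len (PySem.Str.strip line) = 0) :
    astep (d, m) line = ([], m ++ [d]) := by
  have h' : PySem.Chars.strip line.toList = [] := by simp [pysem] at h; exact h
  simp [astep, h']

theorem astep_sym (line : String) (m : List (List String)) (d : List String)
    (h : ¬ PySem.Str.len (PySem.Str.strip line) = 0) :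
    astep (d, m) line = (d ++ [PySem.Str.strip line], m) := by
  have h' : ¬ PySem.Chars.strip line.toList = [] := by simp [pysem] at h ⊢; exact h
  simp [astep, h']

-- the weighted sum over enumerate starting at s is 20^s times the one starting at 0
theorem sumEnum_shift (ys : List (List String)) :
    ∀ s : Nat,
      ((PySem.List.enumerate ys (s : Int)).map
        (fun p => decodeLevel p.2 * (20 : Int) ^ p.1.toNat)).sum =
      20 ^ s *
      ((PySem.List.enumerate ys (0 : Int)).map
        (fun p => decodeLevel p.2 * (20 : Int) ^ p.1.toNat)).sum := by
  induction ys with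
  | nil => intro s; simp [PySem.List.enumerate_nil]
  | cons y ys ih =>
    intro s
    have h1 : (s : Int) + 1 = ((s + 1 : Nat) : Int) := by push_cast; ring
    have h0 : (0 : Int) + 1 = ((1 : Nat) : Int) := by norm_num
    rw [PySem.List.enumerate_cons, PySem.List.enumerate_cons, h1, h0]
    simp only [List.map_cons, List.sum_cons, ih (s + 1), ih 1]
    rw [Int.toNat_natCast s]
    simp only [Int.toNat_zero, pow_zero, pow_succ]
    ring

theorem decode_eq_hdec (xs : List (List String)) : decode xs = hdec xs := by
  induction xs using List.reverseRecOn with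
  | nil => simp [decode, hdec, PySem.List.enumerate_nil]
  | append_singleton xs d ih =>
    rw [hdec_append_singleton, ← ih]
    unfold decode
    rw [PySem.List.foldl_add, PySem.List.foldl_add]
    simp only [zero_add]
    rw [List.reverse_append, List.reverse_singleton, List.singleton_append,
      PySem.List.enumerate_cons]
    have h0 : (0 : Int) + 1 = ((1 : Nat) : Int) := by norm_num
    rw [h0]
    simp only [List.map_cons, List.sum_cons, sumEnum_shift xs.reverse 1]
    simp only [Int.toNat_zero, pow_zero, pow_one]
    ring

-- the main loop invariant: B's running pair is (hdec of finished levels, decodeLevel of the open level)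
theorem loop_inv (lines : List String) :
    ∀ (digit : List String) (mayan : List (List String)),
      List.foldl bstep (hdec mayan, decodeLevel digit) lines =
        (hdec (List.foldl astep (digit, mayan) lines).2,
         decodeLevel (List.foldl astep (digit, mayan) lines).1) := by
  induction lines with
  | nil => intro digit mayan; simp
  | cons line rest ih =>
    intro digit mayan
    simp only [List.foldl_cons]
    by_cases hblank : PySem.Str.len (PySem.Str.strip line) = 0
    · rw [bstep_blank line mayan digit hblank, astep_blank line mayan digit hblank]
      exact ih [] (mayan ++ [digit])
    · rw [bstep_sym line mayan digit hblank, astep_sym line mayan digit hblank]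
      exact ih (digit ++ [PySem.Str.strip line]) mayan

-- ===== VERDICT (by name: the statement is the Claim_ definition above) =====
theorem solve_spec : Claim_equal_solve := by
  intro tty _
  unfold Spec_solve
  have ha : solve tty =
      hdec (List.foldl astep ([], []) tty).2 * 20 +
        decodeLevel (List.foldl astep ([], []) tty).1 := by
    show decode ((List.foldl astep ([], []) tty).2 ++ [(List.foldl astep ([], []) tty).1]) = _
    rw [decode_eq_hdec, hdec_append_singleton]
  have hb : solve_alt tty =
      (List.foldl bstep (0, 0) tty).1 * 20 + (List.foldl bstep (0, 0) tty).2 := rfl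
  rw [ha, hb]
  have h := loop_inv tty [] []
  have h00 : ((hdec [], decodeLevel ([] : List String)) : Int × Int) = (0, 0) := by
    simp [hdec, decodeLevel]
  rw [h00] at h
  rw [h]
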